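-- pv_equiv track=rewrite | github.com/innodoc/innoconv-mintmod | innoconv_mintmod/utils.py | parse_nested_args
-- ===== SOURCE A (Python) =====
-- def parse_nested_args(to_parse):
--     r"""
--     Parse LaTeX command arguments that can have nested commands. Returns
--     arguments and rest string.
--
--     Parses strings like: ``{bar}{baz{}}rest`` into
--     ``[['bar', 'baz{}'], 'rest']``.
--
--     :param to_parse: String to parse
--     :type to_parse: str
--
--     :rtype: (list, str)
--     :returns: parsed arguments and rest string
--     """
--     pargs = []
--     if to_parse.startswith("{"):
--         stack = []
--         for i, cha in enumerate(to_parse):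
--             if not stack and cha != "{":
--                 break
--             if cha == "{":
--                 stack.append(i)
--             elif cha == "}" and stack:
--                 start = stack.pop()
--                 if not stack:
--                     start_index = start + 1
--                     pargs.append(to_parse[start_index:i])
--         chars_to_remove = len("".join(pargs)) + 2 * len(pargs)
--         to_parse = to_parse[chars_to_remove:]
--     if not to_parse:
--         to_parse = None
--     return (pargs, to_parse)
-- ===== SOURCE B (Python) =====
-- def parse_nested_args(to_parse):
--     """Parse LaTeX command arguments that can have nested commands.
--
--     One outer loop per brace group: scan forward with an integer depth
--     counter to find the matching close brace, cut the argument out, and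
--     move the cursor past it.  Returns (args, rest) exactly like A.
--     """
--     pargs = []
--     pos = 0
--     n = len(to_parse)
--     while pos < n and to_parse[pos] == "{":
--         depth = 0
--         close = -1
--         for i in range(pos, n):
--             c = to_parse[i]
--             if c == "{":
--                 depth += 1
--             elif c == "}":
--                 depth -= 1
--                 if depth == 0:
--                     close = i
--                     break
--         if close == -1:
--             break
--         pargs.append(to_parse[pos + 1:close])
--         pos = close + 1
--     rest = to_parse[pos:]
--     return (pargs, rest if rest else None)
-- ===== Notes on version B (the rewrite author's own statement) =====
-- stated objective: alternative
-- what changed: B replaces A's single enumerate pass with an index-stack plus a length-arithmetic reconstruction of the rest by an outer loop per brace group that finds each matching close brace with an integer depth counter and keeps a cursor, taking the rest directly from the cursor position.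
import Mathlib
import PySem

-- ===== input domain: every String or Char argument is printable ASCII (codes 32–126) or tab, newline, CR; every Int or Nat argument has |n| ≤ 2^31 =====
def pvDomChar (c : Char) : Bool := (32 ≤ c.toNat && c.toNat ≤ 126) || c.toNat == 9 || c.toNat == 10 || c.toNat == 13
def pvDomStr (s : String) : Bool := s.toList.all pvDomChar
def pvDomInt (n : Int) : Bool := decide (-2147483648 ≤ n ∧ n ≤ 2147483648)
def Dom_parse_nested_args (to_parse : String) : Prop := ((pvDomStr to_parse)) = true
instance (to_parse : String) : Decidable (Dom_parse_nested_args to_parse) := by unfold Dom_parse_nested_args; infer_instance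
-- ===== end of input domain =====

-- B replaces A's single enumerate pass (index stack + rest reconstructed from summed
-- argument lengths) by an outer loop per brace group with a depth counter and a cursor;
-- the rest is the suffix from the cursor.  Objective: alternative decomposition.

-- ===== PORT A =====
-- the `for i, cha in enumerate(to_parse)` loop with `break`: structural recursion
-- over the remaining characters carrying the index i, the stack and pargs
def pnaLoopA (s : List Char) : List Char → Nat → List Nat → List String → List String
  | [], _, _, pargs => pargs
  | cha :: tl, i, stack, pargs =>
    if stack = [] ∧ cha ≠ '{' then pargs
    else if cha = '{' then pnaLoopA s tl (i + 1) (i :: stack) pargs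
    else if cha = '}' ∧ stack ≠ [] then
      match stack with
      | [] => pargs  -- unreachable: guarded by stack ≠ []
      | start :: stack' =>
        if stack' = [] then
          pnaLoopA s tl (i + 1) stack'
            (pargs ++ [String.ofList (PySem.List.slice s (some ((start + 1 : Nat) : Int)) (some ((i : Nat) : Int)))])
        else pnaLoopA s tl (i + 1) stack' pargs
    else pnaLoopA s tl (i + 1) stack pargs

def parse_nested_args (to_parse : String) : List String × Option String :=
  let s := to_parse.toList
  let pargs : List String :=
    if PySem.Str.startswith to_parse "{" then pnaLoopA s s 0 [] [] else []
  let rest : List Char :=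
    if PySem.Str.startswith to_parse "{" then
      PySem.List.slice s (some (((PySem.Str.join "" pargs).toList.length + 2 * pargs.length : Nat) : Int)) none
    else s
  (pargs, if rest = [] then none else some (String.ofList rest))

-- ===== PORT B =====
-- the inner `for i in range(pos, n)` finding the matching close brace with a depth counter
def pnaClose : List Char → Nat → Int → Option Nat
  | [], _, _ => none
  | c :: tl, i, depth =>
    if c = '{' then pnaClose tl (i + 1) (depth + 1)
    else if c = '}' then
      if depth - 1 = 0 then some i else pnaClose tl (i + 1) (depth - 1)
    else pnaClose tl (i + 1) depth

theorem pnaClose_bound : ∀ (l : List Char) (i : Nat) (d : Int) (j : Nat),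
    pnaClose l i d = some j → i ≤ j ∧ j < i + l.length := by
  intro l
  induction l with
  | nil => intro i d j h; simp [pnaClose] at h
  | cons c tl ih =>
    intro i d j h
    simp only [pnaClose] at h
    split_ifs at h with h1 h2 h3
    · have := ih (i + 1) (d + 1) j h; simp at this ⊢; omega
    · cases h; simp only [List.length_cons]; omega
    · have := ih (i + 1) (d - 1) j h; simp at this ⊢; omega
    · have := ih (i + 1) d j h; simp at this ⊢; omega

-- the outer `while pos < n and to_parse[pos] == '{'` loop, cursor pos
def pnaOuter (s : List Char) (pos : Nat) (pargs : List String) : List String × Nat :=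
  if h : s[pos]? = some '{' then
    match hc : pnaClose (s.drop pos) pos 0 with
    | none => (pargs, pos)
    | some close =>
      pnaOuter s (close + 1)
        (pargs ++ [String.ofList (PySem.List.slice s (some ((pos + 1 : Nat) : Int)) (some ((close : Nat) : Int)))])
  else (pargs, pos)
termination_by s.length - pos
decreasing_by
  have hb := pnaClose_bound (s.drop pos) pos 0 close hc
  have hp : pos < s.length := by
    by_contra hcon
    have : s[pos]? = none := by
      apply List.getElem?_eq_none; omega
    simp [this] at h
  simp [List.length_drop] at hb
  omega

def parse_nested_args_alt (to_parse : String) : List String × Option String :=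
  let s := to_parse.toList
  let r := pnaOuter s 0 []
  let rest := PySem.List.slice s (some ((r.2 : Nat) : Int)) none
  (r.1, if rest = [] then none else some (String.ofList rest))

-- ===== PRECONDITION & SPEC =====
def Spec_parse_nested_args (to_parse : String) (out : List String × Option String) : Prop := out = parse_nested_args_alt to_parse
instance (to_parse : String) (out : List String × Option String) : Decidable (Spec_parse_nested_args to_parse out) := by unfold Spec_parse_nested_args; infer_instance

-- ===== CLAIM (what is proved, stated in full; the proofs are below) =====
def Claim_equal_parse_nested_args : Prop := ∀ (to_parse : String), Dom_parse_nested_args to_parse → Spec_parse_nested_args to_parse (parse_nested_args to_parse)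

-- ===== LEMMAS AND PROOFS =====

-- A's loop with a nonempty stack (front ++ [bottom]) behaves like B's close-brace scan
theorem loopA_inner (s : List Char) : ∀ (k n : Nat) (front : List Nat) (b : Nat) (pargs : List String),
    s.length - n = k →
    pnaLoopA s (s.drop n) n (front ++ [b]) pargs =
      (match pnaClose (s.drop n) n ((front.length + 1 : Nat) : Int) with
       | none => pargs
       | some j => pnaLoopA s (s.drop (j + 1)) (j + 1) []
           (pargs ++ [String.ofList (PySem.List.slice s (some ((b + 1 : Nat) : Int)) (some ((j : Nat) : Int)))])) := by
  intro k
  induction k with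
  | zero =>
    intro n front b pargs hk
    have hd : s.drop n = [] := by
      apply List.drop_eq_nil_of_le; omega
    rw [hd]; simp [pnaLoopA, pnaClose]
  | succ k ih =>
    intro n front b pargs hk
    rcases hd : s.drop n with _ | ⟨c, tl⟩
    · have := congrArg List.length hd; simp at this; omega
    · have htl : s.drop (n + 1) = tl := by
        rw [← List.tail_drop, hd]; rfl
      have hlen : s.length - (n + 1) = k := by
        have := congrArg List.length hd; simp at this; omega
      have hne : (front ++ [b] : List Nat) ≠ [] := by simp
      by_cases hc : c = '{'
      · subst hc
        have h1 : pnaLoopA s ('{' :: tl) n (front ++ [b]) pargs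
            = pnaLoopA s tl (n + 1) ((n :: front) ++ [b]) pargs := by
          simp [pnaLoopA, hne]
        have h2 : pnaClose ('{' :: tl) n ((front.length + 1 : Nat) : Int)
            = pnaClose tl (n + 1) (((n :: front).length + 1 : Nat) : Int) := by
          simp only [pnaClose, if_pos rfl, List.length_cons]
          try norm_cast
        rw [h1, ← htl, ih (n + 1) (n :: front) b pargs hlen, htl, h2]
      · by_cases hc2 : c = '}'
        · subst hc2
          cases front with
          | nil =>
            have h1 : pnaLoopA s ('}' :: tl) n ([] ++ [b] : List Nat) pargs
                = pnaLoopA s tl (n + 1) []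
                    (pargs ++ [String.ofList (PySem.List.slice s (some ((b + 1 : Nat) : Int)) (some ((n : Nat) : Int)))]) := by
              simp [pnaLoopA]
            have h2 : pnaClose ('}' :: tl) n ((([] : List Nat).length + 1 : Nat) : Int) = some n := by
              norm_num [pnaClose]
              exact fun h => absurd h (by decide)
            rw [h1, h2, ← htl]
          | cons f fr =>
            have h1 : pnaLoopA s ('}' :: tl) n ((f :: fr) ++ [b]) pargs
                = pnaLoopA s tl (n + 1) (fr ++ [b]) pargs := by
              simp [pnaLoopA]
            have h2 : pnaClose ('}' :: tl) n (((f :: fr).length + 1 : Nat) : Int)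
                = pnaClose tl (n + 1) ((fr.length + 1 : Nat) : Int) := by
              have hz : ¬ (((((f :: fr).length + 1 : Nat)) : Int) - 1 = 0) := by
                simp only [List.length_cons]; push_cast; omega
              have he : ((((f :: fr).length + 1 : Nat)) : Int) - 1 = ((fr.length + 1 : Nat) : Int) := by
                simp only [List.length_cons]; push_cast; omega
              simp only [pnaClose, if_neg (by decide : ¬ ('}' : Char) = '{'), if_pos rfl, if_neg hz, he]
              simp only [if_true]
              rw [if_neg (by push_cast; omega : ¬ (((fr.length + 1 : Nat) : Int) = 0))]
            rw [h1, ← htl, ih (n + 1) fr b pargs hlen, htl, h2]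
        · have h1 : pnaLoopA s (c :: tl) n (front ++ [b]) pargs
              = pnaLoopA s tl (n + 1) (front ++ [b]) pargs := by
            simp [pnaLoopA, hne, hc, hc2]
          have h2 : pnaClose (c :: tl) n ((front.length + 1 : Nat) : Int)
              = pnaClose tl (n + 1) ((front.length + 1 : Nat) : Int) := by
            simp [pnaClose, hc, hc2]
          rw [h1, ← htl, ih (n + 1) front b pargs hlen, htl, h2]

-- at position n (empty stack) with s[n] = '{', B's close scan refined: bounds
theorem pnaClose_brace (s : List Char) (n : Nat) (tl : List Char) (hd : s.drop n = '{' :: tl)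
    (j : Nat) (hj : pnaClose (s.drop n) n 0 = some j) : n + 1 ≤ j ∧ j < s.length := by
  rw [hd] at hj
  simp only [pnaClose, if_pos rfl] at hj
  have hb := pnaClose_bound tl (n + 1) (0 + 1) j hj
  have := congrArg List.length hd
  simp at this
  omega

-- A's loop with the empty stack is B's outer loop (first components agree)
theorem loopA_outer (s : List Char) : ∀ (k n : Nat) (pargs : List String),
    s.length - n ≤ k →
    pnaLoopA s (s.drop n) n [] pargs = (pnaOuter s n pargs).1 := by
  intro k
  induction k with
  | zero =>
    intro n pargs hk
    have hd : s.drop n = [] := by apply List.drop_eq_nil_of_le; omega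
    have hg : s[n]? = none := by apply List.getElem?_eq_none; omega
    rw [hd, pnaOuter]
    simp [pnaLoopA, hg]
  | succ k ih =>
    intro n pargs hk
    rcases hd : s.drop n with _ | ⟨c, tl⟩
    · have hg : s[n]? = none := by
        apply List.getElem?_eq_none
        have := congrArg List.length hd; simp at this; omega
      rw [pnaOuter]
      simp [pnaLoopA, hg]
    · have hg : s[n]? = some c := by
        have h0 := congrArg (fun l => l[0]?) hd
        simp [List.getElem?_drop] at h0
        simpa using h0
      have htl : s.drop (n + 1) = tl := by rw [← List.tail_drop, hd]; rfl
      by_cases hc : c = '{'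
      · subst hc
        have hn : n < s.length := by
          by_contra hcon
          rw [List.getElem?_eq_none (by omega)] at hg; simp at hg
        have hlen : s.length - (n + 1) = s.length - n - 1 := by omega
        have h1 : pnaLoopA s ('{' :: tl) n [] pargs = pnaLoopA s tl (n + 1) ([] ++ [n]) pargs := by
          simp [pnaLoopA]
        have hstep : pnaClose (s.drop n) n 0 = pnaClose tl (n + 1) ((([] : List Nat).length + 1 : Nat) : Int) := by
          rw [hd]; simp [pnaClose]
        rw [h1, ← htl,
          loopA_inner s (s.length - (n + 1)) (n + 1) [] n pargs rfl, htl, ← hstep]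
        rw [pnaOuter, dif_pos hg]
        rcases hcl : pnaClose (s.drop n) n 0 with _ | j
        · simp
        · have hb := pnaClose_brace s n tl hd j hcl
          have : s.length - (j + 1) ≤ k := by omega
          exact ih (j + 1) _ this
      · have h1 : pnaLoopA s (c :: tl) n [] pargs = pargs := by
          simp [pnaLoopA, hc]
        have hg2 : ¬ (s[n]? = some '{') := by
          rw [hg]; simp [hc]
        rw [h1, pnaOuter, dif_neg hg2]

def pnaCost (pargs : List String) : Nat := (pargs.map (·.toList.length)).sum + 2 * pargs.length

theorem join_chars_len : ∀ (ls : List (List Char)),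
    (PySem.Chars.join [] ls).length = (ls.map List.length).sum := by
  intro ls
  induction ls with
  | nil => simp [PySem.Chars.join_nil]
  | cons a t ih =>
    cases t with
    | nil => simp [PySem.Chars.join_singleton]
    | cons b r =>
      rw [PySem.Chars.join_cons_cons]
      simp only [List.length_append, List.map_cons, List.sum_cons] at ih ⊢
      simp [ih]

-- B's final cursor equals A's chars_to_remove
theorem outer_cost (s : List Char) : ∀ (k n : Nat) (pargs : List String),
    s.length - n ≤ k → n = pnaCost pargs →
    (pnaOuter s n pargs).2 = pnaCost (pnaOuter s n pargs).1 := by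
  intro k
  induction k with
  | zero =>
    intro n pargs hk hcost
    have hg : s[n]? = none := by apply List.getElem?_eq_none; omega
    rw [pnaOuter, dif_neg (by simp [hg])]
    exact hcost
  | succ k ih =>
    intro n pargs hk hcost
    by_cases hg : s[n]? = some '{'
    · have hn : n < s.length := by
        by_contra hcon
        rw [List.getElem?_eq_none (by omega)] at hg; simp at hg
      have hd : ∃ tl, s.drop n = '{' :: tl := by
        rcases hdd : s.drop n with _ | ⟨c, tl⟩
        · have := congrArg List.length hdd; simp at this; omega
        · have h0 := congrArg (fun l => l[0]?) hdd
          simp [List.getElem?_drop, hg] at h0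
          exact ⟨tl, by simp [hdd, ← h0]⟩
      rcases hd with ⟨tl, hd⟩
      rw [pnaOuter, dif_pos hg]
      rcases hcl : pnaClose (s.drop n) n 0 with _ | j
      · simp [hcost]
      · have hb := pnaClose_brace s n tl hd j hcl
        have hslice : (PySem.List.slice s (some ((n : Int) + 1)) (some ((j : Nat) : Int))).length
            = j - n - 1 := by
          rw [show ((n : Int) + 1) = ((n + 1 : Nat) : Int) by push_cast; ring, PySem.List.slice_natCast]
          simp
          omega
        have hcost' : j + 1 = pnaCost (pargs ++ [String.ofList (PySem.List.slice s (some ((n + 1 : Nat) : Int)) (some ((j : Nat) : Int)))]) := by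
          simp [pnaCost, hslice] at hcost ⊢
          omega
        exact ih (j + 1) _ (by omega) hcost'
    · rw [pnaOuter, dif_neg hg]
      simpa using hcost

theorem startswith_brace (t : String) :
    PySem.Str.startswith t "{" = true ↔ t.toList[0]? = some '{' := by
  have hlit : "{".toList = ['{'] := by decide
  rw [PySem.Str.startswith_eq, PySem.Chars.startswith_iff, hlit]
  constructor
  · rintro ⟨u, hu⟩
    rw [← hu]; rfl
  · intro h
    rcases hc : t.toList with _ | ⟨c, u⟩
    · rw [hc] at h; simp at h
    · rw [hc] at h; simp at h
      exact ⟨u, by simp [hc, h]⟩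

-- ===== VERDICT (by name: the statement is the Claim_ definition above) =====
theorem parse_nested_args_spec : Claim_equal_parse_nested_args := by
  intro t _
  unfold Spec_parse_nested_args parse_nested_args parse_nested_args_alt
  by_cases hs : PySem.Str.startswith t "{" = true
  · have hp : pnaLoopA t.toList t.toList 0 [] [] = (pnaOuter t.toList 0 []).1 := by
      simpa using loopA_outer t.toList t.toList.length 0 [] (by omega)
    have hc2 : ((PySem.Str.join "" (pnaOuter t.toList 0 []).1).toList.length
        + 2 * (pnaOuter t.toList 0 []).1.length : Nat) = (pnaOuter t.toList 0 []).2 := by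
      rw [outer_cost t.toList t.toList.length 0 [] (by omega) (by simp [pnaCost])]
      simp [pnaCost]
      rw [join_chars_len]
      simp only [List.map_map, Function.comp_def, String.length_toList]
    simp only [hs, if_true, hp, hc2]
  · have hb : ¬ (t.toList[0]? = some '{') := fun h => hs ((startswith_brace t).2 h)
    have hO : pnaOuter t.toList 0 [] = ([], 0) := by
      rw [pnaOuter, dif_neg hb]
    have hsc : PySem.Chars.startswith t.toList ['{'] = false := by
      rw [show (['{'] : List Char) = "{".toList by decide, ← PySem.Str.startswith_eq]
      exact Bool.eq_false_iff.mpr hs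
    simp [hs, hsc, hO, PySem.List.slice_zero_start, PySem.List.slice_none_none]
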